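-- pv_equiv track=rewrite | github.com/NEKOparapa/AiNiee | ModuleFolders/FileOutputer/VntWriter.py | extract_multiple_names_from_text
-- ===== SOURCE A (Python) =====
-- def extract_multiple_names_from_text(original_names: list[str], dialogue: str) -> tuple[list[str], str]:
--     """
--     从对话字符串的开头提取多个方括号括起来的名称，
--     基于 original_names 列表中的名称数量。
--
--     Args:
--         original_names: 原始名称列表（用于确定数量）。
--         dialogue: 翻译后的文本，可能以方括号括起来的名称开头。
--
--     Returns:
--         一个元组，包含：
--         - list[str]: 提取出的名称列表（如果提取失败则为原始名称列表）。
--         - str: 提取名称后剩余的对话文本。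
--     """
--     num_names_to_extract = len(original_names) # 需要提取的名称数量
--     extracted_names = []
--     current_pos = 0
--     last_bracket_end = 0
--
--     for i in range(num_names_to_extract):
--         # 查找下一个潜在名称块的开始位置 '['，跳过前导空格
--         start_bracket_pos = -1
--         temp_pos = current_pos
--         while temp_pos < len(dialogue):
--             if dialogue[temp_pos] == '[':
--                 start_bracket_pos = temp_pos
--                 break
--             elif not dialogue[temp_pos].isspace():
--                 # 在找到 '[' 之前遇到了非空白字符，此模式的提取失败
--                 return original_names, dialogue # 回退到原始值
--             temp_pos += 1
--
--         if start_bracket_pos == -1: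
--              # 未找到足够的起始方括号 '['
--             return original_names, dialogue # 回退到原始值
--
--         # 查找对应的结束方括号 ']'
--         end_bracket_pos = dialogue.find("]", start_bracket_pos + 1)
--         if end_bracket_pos == -1:
--             # 未找到结束方括号 ']'
--             return original_names, dialogue # 回退到原始值
--
--         # 提取名称内容
--         name_content = dialogue[start_bracket_pos + 1 : end_bracket_pos]
--         extracted_names.append(name_content)
--
--         # 更新下一次搜索的位置
--         current_pos = end_bracket_pos + 1
--         last_bracket_end = current_pos # 记录最后一个方括号结束的位置
--
--     # 提取完所有名称后，剩余的对话从最后一个方括号之后开始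
--     remaining_dialogue = dialogue[last_bracket_end:].lstrip()
--
--     # 检查是否成功提取了预期数量的名称
--     if len(extracted_names) == num_names_to_extract:
--         return extracted_names, remaining_dialogue
--     else:
--         # 如果出现问题则回退（应该在前面被捕获，但作为安全措施）
--         return original_names, dialogue
-- ===== SOURCE B (Python) =====
-- def extract_multiple_names_from_text(original_names: list[str], dialogue: str) -> tuple[list[str], str]:
--     # Staged: split the dialogue on ']' at most len(original_names) times, then
--     # validate/strip each chunk; no per-name scanning or find() calls.
--     n = len(original_names)
--     parts = dialogue.split(']', n)
--     if len(parts) != n + 1: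
--         return original_names, dialogue
--     names = []
--     for chunk in parts[:n]:
--         head = chunk.lstrip()
--         if not head.startswith('['):
--             return original_names, dialogue
--         names.append(head[1:])
--     return names, parts[n].lstrip()
-- ===== Notes on version B (the rewrite author's own statement) =====
-- stated objective: simpler
-- what changed: Replaces A's per-name scanning loop (hand-written whitespace/'[' index scan plus a find(']') per name) by a staged pipeline: one dialogue.split(']', n) pass up front, then a validation loop over the resulting chunks (lstrip/startswith/slice), with the remainder being the last split part.
import Mathlib
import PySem

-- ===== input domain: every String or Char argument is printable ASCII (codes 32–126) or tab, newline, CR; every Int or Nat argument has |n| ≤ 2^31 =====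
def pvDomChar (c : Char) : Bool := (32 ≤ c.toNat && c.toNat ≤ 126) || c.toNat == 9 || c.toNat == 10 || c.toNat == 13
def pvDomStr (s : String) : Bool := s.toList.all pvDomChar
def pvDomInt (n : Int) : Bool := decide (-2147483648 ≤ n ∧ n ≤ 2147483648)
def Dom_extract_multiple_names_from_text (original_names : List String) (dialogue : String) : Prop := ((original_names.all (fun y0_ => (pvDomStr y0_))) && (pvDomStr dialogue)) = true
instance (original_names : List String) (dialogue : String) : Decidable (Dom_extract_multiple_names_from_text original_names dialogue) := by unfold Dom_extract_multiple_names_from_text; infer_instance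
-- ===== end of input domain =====

-- B replaces A's per-name scanning loop (whitespace/'[' index scan plus a find(']') per name)
-- by a staged pipeline: one split(']', n) pass over the dialogue, then a validation loop over
-- the resulting chunks; simpler, same behaviour.


-- ===== PORT A =====
-- inner while-loop of A: scan from index temp; 'some p' = found '[' at p,
-- 'none' = either hit a non-space character (early return) or ran off the end (-1 case)
def aFindBracket (cs : List Char) (temp : Nat) : Option Nat :=
  if h : temp < cs.length then
    if cs[temp] = '[' then some temp
    else if ¬ (PySem.Chars.isspace cs[temp]) then none
    else aFindBracket cs (temp + 1)
  else none
termination_by cs.length - temp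


def aLoop (cs : List Char) (n : Nat) (cur last : Nat) (acc : List String) :
    Option (List String × Nat) :=
  match n with
  | 0 => some (acc, last)
  | n + 1 =>
    match aFindBracket cs cur with
    | none => none
    | some sb =>
      let e := PySem.Chars.findFrom cs [']'] ((sb : Int) + 1)
      if e = -1 then none
      else
        aLoop cs n (e.toNat + 1) (e.toNat + 1)
          (acc ++ [String.ofList (PySem.List.slice cs (some ((sb : Int) + 1)) (some e))])


def extract_multiple_names_from_text (original_names : List String) (dialogue : String) : List String × String :=
  let cs := dialogue.toList
  match aLoop cs original_names.length 0 0 [] with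
  | none => (original_names, dialogue)
  | some (acc, last) =>
    let remaining := String.ofList (PySem.Chars.lstrip (PySem.List.slice cs (some (last : Int)) none))
    if acc.length = original_names.length then (acc, remaining)
    else (original_names, dialogue)

-- ===== PORT B =====
-- B's 'for chunk in parts[:n]' validation loop; then the split(']', n) pipeline
def bChunks (chunks : List (List Char)) (acc : List String) : Option (List String) :=
  match chunks with
  | [] => some acc
  | chunk :: rest =>
    let head := PySem.Chars.lstrip chunk
    if ¬ PySem.Chars.startswith head ['['] then none
    else bChunks rest (acc ++ [String.ofList (PySem.List.slice head (some 1) none)])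


def extract_multiple_names_from_text_alt (original_names : List String) (dialogue : String) : List String × String :=
  let cs := dialogue.toList
  let n := original_names.length
  let parts := PySem.Chars.splitOnMax cs [']'] (n : Int)
  if parts.length ≠ n + 1 then (original_names, dialogue)
  else
    match bChunks (PySem.List.slice parts none (some (n : Int))) [] with
    | none => (original_names, dialogue)
    | some names =>
      (names, String.ofList (PySem.Chars.lstrip ((PySem.List.pyGet? parts (n : Int)).getD [])))

-- ===== PRECONDITION & SPEC =====
def Spec_extract_multiple_names_from_text (original_names : List String) (dialogue : String) (out : List String × String) : Prop := out = extract_multiple_names_from_text_alt original_names dialogue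
instance (original_names : List String) (dialogue : String) (out : List String × String) : Decidable (Spec_extract_multiple_names_from_text original_names dialogue out) := by unfold Spec_extract_multiple_names_from_text; infer_instance

-- ===== CLAIM (what is proved, stated in full; the proofs are below) =====
def Claim_equal_extract_multiple_names_from_text : Prop := ∀ (original_names : List String) (dialogue : String), Dom_extract_multiple_names_from_text original_names dialogue → Spec_extract_multiple_names_from_text original_names dialogue (extract_multiple_names_from_text original_names dialogue)

-- ===== LEMMAS AND PROOFS =====

def split1 : Nat → List Char → List Char → List (List Char)
  | _, pre, [] => [pre]
  | 0, pre, l => [pre ++ l]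
  | m + 1, pre, c :: rest =>
    if c = ']' then pre :: split1 m [] rest else split1 (m + 1) (pre ++ [c]) rest

def sLoop : List Char → List String → Nat → Option (List String × List Char)
  | l, acc, 0 => some (acc, l)
  | l, acc, n + 1 =>
    let t := PySem.Chars.lstrip l
    if PySem.Chars.startswith t ['['] then
      let u := t.tail
      if ']' ∈ u then
        sLoop ((u.dropWhile (· ≠ ']')).tail)
          (acc ++ [String.ofList (u.takeWhile (· ≠ ']'))]) n
      else none
    else none


theorem splitOnMax_go_eq (l : List Char) : ∀ (fuel m : Nat) (cur : List Char) (acc : List (List Char)),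
    l.length < fuel →
    PySem.Chars.splitOnMax.go [']'] fuel m l cur acc = acc.reverse ++ split1 m cur.reverse l := by
  induction l with
  | nil =>
    intro fuel m cur acc h
    match fuel, h with
    | fuel + 1, _ => simp [PySem.Chars.splitOnMax.go, split1]
  | cons c rest ih =>
    intro fuel m cur acc h
    match fuel, m with
    | fuel + 1, 0 =>
      simp [PySem.Chars.splitOnMax.go, split1]
    | fuel + 1, m + 1 =>
      rw [PySem.Chars.splitOnMax.go]
      simp only [Nat.add_one_ne_zero, if_false]
      by_cases hc : c = ']'
      · subst hc
        have hp : [']'].isPrefixOf (']' :: rest) = true := by simp [List.isPrefixOf]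
        rw [if_pos hp]
        simp only [Nat.add_sub_cancel, List.length_cons, List.length_nil, List.drop_succ_cons, List.drop_nil, List.drop_zero]
        rw [ih fuel (m := m) [] (cur.reverse :: acc) (by simp at h; omega)]
        simp [split1]
      · have hp : [']'].isPrefixOf (c :: rest) = false := by
          simp [List.isPrefixOf]; exact fun h' => hc h'.symm
        rw [if_neg (by simp [hp])]
        rw [ih fuel (m := m + 1) (c :: cur) acc (by simp at h; omega)]
        simp [split1, hc]

theorem splitOnMax_eq_split1 (cs : List Char) (n : Nat) :
    PySem.Chars.splitOnMax cs [']'] (n : Int) = split1 n [] cs := by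
  rw [PySem.Chars.splitOnMax]
  rw [if_neg (by omega)]
  rw [show (n : Int).toNat = n from rfl]
  rw [splitOnMax_go_eq cs (cs.length + 1) n [] [] (by omega)]
  simp

theorem aFindBracket_eq (cs : List Char) (pos : Nat) :
    aFindBracket cs pos =
      (let r := cs.drop pos
       let t := PySem.Chars.lstrip r
       if PySem.Chars.startswith t ['['] then some (pos + (r.length - t.length)) else none) := by
  fun_induction aFindBracket cs pos with
  | case1 temp h hbr =>
    rw [List.drop_eq_getElem_cons h, hbr]
    have hsp : PySem.Chars.isspace '[' = false := by decide
    simp [PySem.Chars.lstrip, List.dropWhile, hsp, PySem.Chars.startswith, List.isPrefixOf]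
  | case2 temp h hbr hsp =>
    rw [List.drop_eq_getElem_cons h]
    have hs : PySem.Chars.isspace cs[temp] = false := by simpa using hsp
    simp [PySem.Chars.lstrip, List.dropWhile, hs, PySem.Chars.startswith]
    intro hpre
    rw [List.drop_eq_getElem_cons h] at hpre
    rcases List.cons_prefix_cons.mp hpre with ⟨h1, -⟩
    exact hbr h1.symm
  | case3 temp h hbr hsp ih =>
    rw [List.drop_eq_getElem_cons h]
    have hs : PySem.Chars.isspace cs[temp] = true := by
      by_contra hc
      exact hsp (by simpa using hc)
    have hlen : (PySem.Chars.lstrip (cs.drop (temp + 1))).length ≤ (cs.drop (temp + 1)).length :=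
      List.length_dropWhile_le _ _
    simp only [PySem.Chars.lstrip, List.dropWhile, hs] at ih ⊢
    rw [ih]
    by_cases hst : PySem.Chars.startswith (List.dropWhile PySem.Chars.isspace (cs.drop (temp + 1))) ['['] = true
    · simp only [hst, if_true, List.length_cons, Option.some.injEq]
      simp only [PySem.Chars.lstrip] at hlen
      omega
    · simp [hst]
  | case4 temp h =>
    rw [List.drop_eq_nil_of_le (by omega)]
    simp [PySem.Chars.lstrip, PySem.Chars.startswith]

theorem singleton_infix_iff (c : Char) (l : List Char) : [c] <:+: l ↔ c ∈ l := by
  constructor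
  · intro h; exact h.mem (List.mem_singleton_self c)
  · intro h
    obtain ⟨s, t, rfl⟩ := List.append_of_mem h
    exact ⟨s, t, by simp⟩

theorem length_takeWhile_ne (c : Char) : ∀ (l : List Char) (j : Nat), j < l.length →
    l[j]! = c → (∀ i, i < j → l[i]! ≠ c) → (l.takeWhile (· ≠ c)).length = j := by
  intro l
  induction l with
  | nil => intro j hj; simp at hj
  | cons a rest ih =>
    intro j hj hget hlt
    match j with
    | 0 =>
      simp [List.getElem!_cons_zero] at hget
      simp [List.takeWhile_cons, hget]
    | j + 1 =>
      have ha : a ≠ c := by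
        have := hlt 0 (by omega)
        simpa [List.getElem!_cons_zero] using this
      rw [List.takeWhile_cons, if_pos (by simpa using ha)]
      simp only [List.length_cons, Nat.add_right_cancel_iff]
      apply ih j (by simpa using hj)
      · simpa [List.getElem!_cons_succ] using hget
      · intro i hi
        have := hlt (i + 1) (by omega)
        simpa [List.getElem!_cons_succ] using this

theorem find_single (l : List Char) (c : Char) (h : c ∈ l) :
    PySem.Chars.find l [c] = ((l.takeWhile (· ≠ c)).length : Int) := by
  have hne : PySem.Chars.find l [c] ≠ -1 := by
    rw [ne_eq, PySem.Chars.find_eq_neg_one_iff, singleton_infix_iff]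
    exact fun h' => h' h
  have hf := PySem.Chars.findFrom_natCast_spec l [c] 0 (by omega) (by
    rw [show ((0:Nat):Int) = 0 from rfl, PySem.Chars.findFrom_zero]; exact hne)
  rw [show ((0:Nat):Int) = 0 from rfl, PySem.Chars.findFrom_zero] at hf
  obtain ⟨h0, hpre, hmin⟩ := hf
  have hnn : 0 ≤ PySem.Chars.find l [c] := by exact_mod_cast h0
  set j := (PySem.Chars.find l [c]).toNat with hj
  have hjl : (j : Int) = PySem.Chars.find l [c] := Int.toNat_of_nonneg hnn
  rw [← hjl]
  congr 1
  obtain ⟨t, ht⟩ := hpre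
  have ht : l.drop j = c :: t := by rw [← ht]; rfl
  have hjlen : j < l.length := by
    have h1 : (l.drop j).length = 1 + t.length := by rw [ht]; simp; omega
    simp at h1
    by_contra hc
    push_neg at hc
    omega
  symm
  apply length_takeWhile_ne c l j hjlen
  · have : l.drop j = c :: t := ht
    have h2 := congrArg (fun x => x.head?) this
    simp only [List.head?_drop] at h2
    simp only [List.head?_cons] at h2
    rw [getElem!_pos l j hjlen]
    rw [List.getElem?_eq_getElem hjlen] at h2
    exact Option.some.injEq _ _ ▸ (by simpa using h2)
  · intro i hi
    have hil : i < l.length := by omega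
    have := hmin i (by omega) hi
    rw [getElem!_pos l i hil]
    intro hc
    apply this
    rw [List.drop_eq_getElem_cons hil, hc]
    exact ⟨_, rfl⟩

theorem dropWhile_eq_drop (p : Char → Bool) (l : List Char) :
    l.dropWhile p = l.drop (l.takeWhile p).length := by
  induction l with
  | nil => rfl
  | cons a l ih =>
    by_cases hp : p a
    · simp [List.dropWhile_cons, List.takeWhile_cons, hp, ih]
    · simp [List.dropWhile_cons, List.takeWhile_cons, hp]

theorem takeWhile_eq_take (p : Char → Bool) (l : List Char) :
    l.takeWhile p = l.take (l.takeWhile p).length := by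
  induction l with
  | nil => rfl
  | cons a l ih =>
    by_cases hp : p a
    · simp only [List.takeWhile_cons, hp, if_true, List.length_cons, List.take_succ_cons,
        List.cons.injEq, true_and]
      exact ih
    · simp [List.takeWhile_cons, hp]

theorem takeWhile_length_lt (c : Char) (l : List Char) (h : c ∈ l) :
    (l.takeWhile (· ≠ c)).length < l.length := by
  have hne : l.dropWhile (· ≠ c) ≠ [] := by
    rw [ne_eq, List.dropWhile_eq_nil_iff]
    push_neg
    exact ⟨c, h, by simp⟩
  have hlen := congrArg List.length (List.takeWhile_append_dropWhile (p := (· ≠ c)) (l := l))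
  simp only [List.length_append] at hlen
  have : 0 < (l.dropWhile (· ≠ c)).length := List.length_pos_iff.mpr hne
  omega

theorem aLoop_succ_none (cs : List Char) (n cur last : Nat) (acc : List String)
    (h : aFindBracket cs cur = none) : aLoop cs (n + 1) cur last acc = none := by
  rw [aLoop, h]

theorem aLoop_succ_some (cs : List Char) (n cur last : Nat) (acc : List String) (sb : Nat)
    (h : aFindBracket cs cur = some sb) :
    aLoop cs (n + 1) cur last acc =
      (let e := PySem.Chars.findFrom cs [']'] ((sb : Int) + 1)
       if e = -1 then none
       else aLoop cs n (e.toNat + 1) (e.toNat + 1)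
         (acc ++ [String.ofList (PySem.List.slice cs (some ((sb : Int) + 1)) (some e))])) := by
  rw [aLoop, h]

theorem aLoop_eq_sLoop (cs : List Char) (n : Nat) :
    ∀ pos acc, pos ≤ cs.length →
      aLoop cs n pos pos acc =
        (sLoop (cs.drop pos) acc n).map (fun p => (p.1, cs.length - p.2.length)) := by
  induction n with
  | zero =>
    intro pos acc hpos
    simp only [aLoop, sLoop, Option.map_some]
    have : cs.length - (cs.drop pos).length = pos := by simp; omega
    rw [this]
  | succ n ih =>
    intro pos acc hpos
    rw [sLoop]
    simp only []
    set r := cs.drop pos with hr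
    set t := PySem.Chars.lstrip r with htdef
    by_cases hst : PySem.Chars.startswith t ['['] = true
    · rw [if_pos hst]
      have hfb : aFindBracket cs pos = some (pos + (r.length - t.length)) := by
        rw [aFindBracket_eq]
        simp only [← hr, ← htdef, hst, if_true]
      rw [aLoop_succ_some cs n pos pos acc _ hfb]
      obtain ⟨u, ht⟩ : ∃ u, t = '[' :: u := by
        rcases (PySem.Chars.startswith_iff _ _).mp hst with ⟨v, hv⟩
        exact ⟨v, by rw [← hv]; rfl⟩
      have htw : t = r.drop ((r.takeWhile PySem.Chars.isspace).length) := by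
        rw [htdef]
        simp only [PySem.Chars.lstrip]
        exact dropWhile_eq_drop _ _
      have hklen : r.length - t.length = (r.takeWhile PySem.Chars.isspace).length := by
        have h7 := congrArg List.length (List.takeWhile_append_dropWhile (p := PySem.Chars.isspace) (l := r))
        simp only [List.length_append] at h7
        have htlen : t.length = (r.dropWhile PySem.Chars.isspace).length := by
          rw [htdef]
          simp only [PySem.Chars.lstrip]
        omega
      have hk : t = r.drop (r.length - t.length) := by rw [hklen, htw]
      set k := r.length - t.length with hkdef
      have hdropsb : cs.drop (pos + k) = '[' :: u := by
        rw [← ht, hk, hr, List.drop_drop]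
      have hsblt : pos + k < cs.length := by
        by_contra hle
        push_neg at hle
        rw [List.drop_eq_nil_of_le hle] at hdropsb
        exact absurd hdropsb (by simp)
      have hdropsb1 : cs.drop (pos + k + 1) = u := by
        rw [← List.tail_drop, hdropsb, List.tail_cons]
      have hcast : ((pos + k : Nat) : Int) + 1 = (((pos + k + 1 : Nat)) : Int) := by push_cast; ring
      rw [hcast, PySem.Chars.findFrom_natCast cs [']'] (pos + k + 1) (by omega), hdropsb1]
      have htail : t.tail = u := by rw [ht, List.tail_cons]
      rw [htail]
      by_cases hmem : ']' ∈ u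
      · have hfind := find_single u ']' hmem
        set j := (u.takeWhile (· ≠ ']')).length with hjdef
        have hfne : PySem.Chars.find u [']'] ≠ -1 := by rw [hfind]; omega
        rw [if_neg hfne, hfind]
        have hcast2 : ((pos + k + 1 : Nat) : Int) + (j : Int) = (((pos + k + 1 + j : Nat)) : Int) := by push_cast; ring
        rw [hcast2, if_neg (by omega), if_pos hmem]
        have hjlt : j < u.length := takeWhile_length_lt ']' u hmem
        have htn : ((pos + k + 1 + j : Nat) : Int).toNat = pos + k + 1 + j := by omega
        rw [htn]
        have hslice : PySem.List.slice cs (some ((pos + k + 1 : Nat) : Int)) (some ((pos + k + 1 + j : Nat) : Int)) =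
            u.takeWhile (· ≠ ']') := by
          rw [PySem.List.slice_natCast cs (pos + k + 1) (pos + k + 1 + j)]
          have h3 : pos + k + 1 + j - (pos + k + 1) = j := by omega
          rw [h3, hdropsb1, hjdef, ← takeWhile_eq_take]
        rw [hslice]
        have hnext : cs.drop (pos + k + 1 + j + 1) = (u.dropWhile (· ≠ ']')).tail := by
          rw [dropWhile_eq_drop, List.tail_drop, ← hjdef, ← hdropsb1, List.drop_drop]
          congr 1
        rw [← hnext]
        apply ih
        have hlt4 : pos + k + 1 + j < cs.length := by
          by_contra hle
          push_neg at hle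
          have h5 : cs.drop (pos + k + 1 + j) = [] := List.drop_eq_nil_of_le hle
          have h2 : u.drop j = [] := by
            rw [← hdropsb1, List.drop_drop]
            exact h5
          have := congrArg List.length h2
          simp at this
          omega
        omega
      · have h6 : PySem.Chars.find u [']'] = -1 := by
          rw [PySem.Chars.find_eq_neg_one_iff, singleton_infix_iff]
          exact hmem
        rw [h6, if_pos rfl, if_pos rfl, if_neg hmem]
        rfl
    · rw [if_neg hst]
      have hfb : aFindBracket cs pos = none := by
        rw [aFindBracket_eq]
        simp only [← hr, ← htdef, hst]
        simp
      rw [aLoop_succ_none cs n pos pos acc hfb]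
      rfl

theorem bChunks_cons (chunk : List Char) (rest : List (List Char)) (acc : List String) :
    bChunks (chunk :: rest) acc =
      (if ¬ PySem.Chars.startswith (PySem.Chars.lstrip chunk) ['['] then none
       else bChunks rest (acc ++ [String.ofList (PySem.List.slice (PySem.Chars.lstrip chunk) (some 1) none)])) := rfl

theorem takeWhile_append_all (p : Char → Bool) (a b : List Char) (h : ∀ x ∈ a, p x) :
    (a ++ b).takeWhile p = a ++ b.takeWhile p := by
  rw [List.takeWhile_append, if_pos (by rw [List.takeWhile_eq_self_iff.mpr h])]

theorem dropWhile_append_all (p : Char → Bool) (a b : List Char) (h : ∀ x ∈ a, p x) :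
    (a ++ b).dropWhile p = b.dropWhile p := by
  rw [List.dropWhile_append, if_pos (by rw [List.dropWhile_eq_nil_iff.mpr h]; rfl)]

theorem getLastD_cons_of_ne (x : List Char) (ps : List (List Char)) (h : ps ≠ []) :
    (x :: ps).getLastD [] = ps.getLastD [] := by
  cases ps with
  | nil => exact absurd rfl h
  | cons y t => rfl

theorem split1_zero (pre l) : split1 0 pre l = [pre ++ l] := by
  cases l <;> simp [split1]

theorem split1_ne_nil (m : Nat) : ∀ pre l, split1 m pre l ≠ [] := by
  induction m with
  | zero => intro pre l; cases l <;> simp [split1]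
  | succ m ih =>
    intro pre l
    induction l generalizing pre with
    | nil => simp [split1]
    | cons c rest ihl =>
      rw [split1]
      by_cases hc : c = ']'
      · simp [hc]
      · rw [if_neg hc]; exact ihl _

theorem split1_succ (m : Nat) (l : List Char) : ∀ pre,
    split1 (m + 1) pre l =
      (if ']' ∈ l then (pre ++ l.takeWhile (· ≠ ']')) :: split1 m [] ((l.dropWhile (· ≠ ']')).tail)
       else [pre ++ l]) := by
  induction l with
  | nil => intro pre; simp [split1]
  | cons c rest ih =>
    intro pre
    rw [split1]
    by_cases hc : c = ']'
    · subst hc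
      rw [if_pos rfl, if_pos (List.mem_cons_self)]
      simp [List.takeWhile_cons, List.dropWhile_cons]
    · rw [if_neg hc, ih (pre ++ [c])]
      by_cases hm : ']' ∈ rest
      · rw [if_pos hm, if_pos (by simp [hm])]
        simp [List.takeWhile_cons, List.dropWhile_cons, hc]
      · rw [if_neg hm, if_neg (by
          intro hmm
          rcases List.mem_cons.mp hmm with h | h
          · exact hc h.symm
          · exact hm h)]
        simp

theorem sLoop_suffix (n : Nat) : ∀ l acc res rem,
    sLoop l acc n = some (res, rem) → rem <:+ l := by
  induction n with
  | zero =>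
    intro l acc res rem h
    simp [sLoop] at h
    rw [h.2]
  | succ n ih =>
    intro l acc res rem h
    rw [sLoop] at h
    simp only [] at h
    split at h
    · split at h
      · have hsuf := ih _ _ _ _ h
        refine hsuf.trans ?_
        refine (List.tail_suffix _).trans ?_
        refine (List.dropWhile_suffix _).trans ?_
        refine (List.tail_suffix _).trans ?_
        exact List.dropWhile_suffix _
      · exact absurd h (by simp)
    · exact absurd h (by simp)

theorem sLoop_eq_split (n : Nat) : ∀ l acc,
    sLoop l acc n =
      (if (split1 n [] l).length = n + 1 then
        (bChunks ((split1 n [] l).take n) acc).map (fun res => (res, (split1 n [] l).getLastD []))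
       else none) := by
  induction n with
  | zero =>
    intro l acc
    rw [split1_zero]
    simp [sLoop, bChunks]
  | succ n ih =>
    intro l acc
    rw [sLoop]
    rw [split1_succ n l []]
    simp only [List.nil_append]
    set t := PySem.Chars.lstrip l with htdef
    have hws : ∀ x ∈ l.takeWhile PySem.Chars.isspace, (fun x => decide (x ≠ ']')) x := by
      intro x hx
      have := List.mem_takeWhile_imp hx
      simp only [decide_eq_true_eq]
      intro hx'
      subst hx'
      exact absurd this (by decide)
    have hsplit : l = l.takeWhile PySem.Chars.isspace ++ t := by
      rw [htdef, PySem.Chars.lstrip, List.takeWhile_append_dropWhile]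
    by_cases hst : PySem.Chars.startswith t ['['] = true
    · rw [if_pos hst]
      obtain ⟨u, ht⟩ : ∃ u, t = '[' :: u := by
        rcases (PySem.Chars.startswith_iff _ _).mp hst with ⟨v, hv⟩
        exact ⟨v, by rw [← hv]; rfl⟩
      have htail : t.tail = u := by rw [ht, List.tail_cons]
      rw [htail]
      have hmem_iff : (']' ∈ l) ↔ (']' ∈ u) := by
        conv_lhs => rw [hsplit, ht]
        simp only [List.mem_append, List.mem_cons]
        constructor
        · rintro (h | h | h)
          · exact absurd (hws _ h) (by simp)
          · exact absurd h.symm (by decide)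
          · exact h
        · intro h; right; right; exact h
      have htake : l.takeWhile (· ≠ ']') =
          l.takeWhile PySem.Chars.isspace ++ '[' :: u.takeWhile (· ≠ ']') := by
        conv_lhs => rw [hsplit, ht]
        rw [takeWhile_append_all _ _ _ (by intro x hx; exact hws x hx)]
        rw [List.takeWhile_cons, if_pos (by decide)]
      have hdrop : (l.dropWhile (· ≠ ']')).tail = (u.dropWhile (· ≠ ']')).tail := by
        conv_lhs => rw [hsplit, ht]
        rw [dropWhile_append_all _ _ _ (by intro x hx; exact hws x hx)]
        rw [List.dropWhile_cons, if_pos (by decide)]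
      have hlstrip_chunk : PySem.Chars.lstrip (l.takeWhile (· ≠ ']')) = '[' :: u.takeWhile (· ≠ ']') := by
        rw [htake, PySem.Chars.lstrip,
          dropWhile_append_all _ _ _ (by intro x hx; exact List.mem_takeWhile_imp hx),
          List.dropWhile_cons, if_neg (by decide)]
      by_cases hmem : ']' ∈ u
      · rw [if_pos hmem, if_pos (hmem_iff.mpr hmem), hdrop, ih _ _]
        have hne := split1_ne_nil n [] ((u.dropWhile (· ≠ ']')).tail)
        by_cases hl : (split1 n [] ((u.dropWhile (· ≠ ']')).tail)).length = n + 1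
        · rw [if_pos hl, if_pos (by simp only [List.length_cons, hl]), List.take_succ_cons, bChunks_cons]
          simp only [hlstrip_chunk]
          rw [if_neg (by simp [PySem.Chars.startswith, List.isPrefixOf])]
          have hslice : PySem.List.slice ('[' :: u.takeWhile (· ≠ ']')) (some 1) none = u.takeWhile (· ≠ ']') := by
            have h9 := PySem.List.slice_from_natCast ('[' :: u.takeWhile (· ≠ ']')) 1
            simpa using h9
          simp only [hslice, getLastD_cons_of_ne _ _ hne]
        · rw [if_neg hl, if_neg (by simp only [List.length_cons]; omega)]
      · have hmeml : ']' ∉ l := fun h => hmem (hmem_iff.mp h)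
        rw [if_neg hmem]
        simp only [if_neg hmeml]
        rw [if_neg (by simp only [List.length_singleton]; omega)]
    · rw [if_neg hst]
      by_cases hmem : ']' ∈ l
      · rw [if_pos hmem]
        have hchunk : PySem.Chars.startswith (PySem.Chars.lstrip (l.takeWhile (· ≠ ']'))) ['['] = false := by
          cases htc : t with
          | nil =>
            have hall : ∀ x ∈ l, PySem.Chars.isspace x := by
              apply List.dropWhile_eq_nil_iff.mp
              rw [← PySem.Chars.lstrip, ← htdef, htc]
            have htkl : l.takeWhile (· ≠ ']') = l := by
              apply List.takeWhile_eq_self_iff.mpr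
              intro x hx
              have := hall x hx
              simp only [decide_eq_true_eq]
              intro hx'
              subst hx'
              exact absurd this (by decide)
            rw [htkl, PySem.Chars.lstrip, List.dropWhile_eq_nil_iff.mpr hall]
            decide
          | cons c u =>
            have hc : c ≠ '[' := by
              intro hcc
              subst hcc
              rw [htc] at hst
              exact hst (by simp [PySem.Chars.startswith, List.isPrefixOf])
            by_cases hcr : c = ']'
            · subst hcr
              have htkl : l.takeWhile (· ≠ ']') = l.takeWhile PySem.Chars.isspace := by
                conv_lhs => rw [hsplit, htc]
                rw [takeWhile_append_all _ _ _ hws, List.takeWhile_cons, if_neg (by decide)]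
                simp
              rw [htkl, PySem.Chars.lstrip,
                List.dropWhile_eq_nil_iff.mpr (fun x hx => List.mem_takeWhile_imp hx)]
              decide
            · have htkl : l.takeWhile (· ≠ ']') =
                  l.takeWhile PySem.Chars.isspace ++ c :: u.takeWhile (· ≠ ']') := by
                conv_lhs => rw [hsplit, htc]
                rw [takeWhile_append_all _ _ _ hws, List.takeWhile_cons, if_pos (by simp [hcr])]
              have hcsp : PySem.Chars.isspace c = false := by
                have : PySem.Chars.lstrip l = c :: u := by rw [← htdef, htc]
                have h8 := List.head?_dropWhile_not PySem.Chars.isspace l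
                rw [PySem.Chars.lstrip] at this
                rw [this] at h8
                simpa using h8
              rw [htkl, PySem.Chars.lstrip,
                dropWhile_append_all _ _ _ (fun x hx => List.mem_takeWhile_imp hx),
                List.dropWhile_cons, hcsp]
              simp only [Bool.false_eq_true, if_false]
              simp [PySem.Chars.startswith, List.isPrefixOf]
              intro h'
              exact hc h'.symm
        by_cases hl : (l.takeWhile (· ≠ ']') :: split1 n [] ((l.dropWhile (· ≠ ']')).tail)).length = n + 1 + 1
        · rw [if_pos hl, List.take_succ_cons, bChunks_cons]
          simp only [hchunk]
          rw [if_pos (by simp)]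
          rfl
        · rw [if_neg hl]
      · simp only [if_neg hmem]
        rw [if_neg (by simp only [List.length_singleton]; omega)]

theorem aLoop_length (cs : List Char) (n : Nat) (cur last : Nat) (acc res : List String) (l : Nat)
    (h : aLoop cs n cur last acc = some (res, l)) : res.length = acc.length + n := by
  induction n generalizing cur last acc with
  | zero => simp [aLoop] at h; simp [h.1]
  | succ n ih =>
    simp only [aLoop] at h
    split at h
    · exact absurd h (by simp)
    · split at h
      · exact absurd h (by simp)
      · have := ih _ _ _ h
        simp at this
        omega

theorem suffix_drop_eq (rem cs : List Char) (h : rem <:+ cs) :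
    cs.drop (cs.length - rem.length) = rem := by
  obtain ⟨p, rfl⟩ := h
  simp only [List.length_append]
  rw [show p.length + rem.length - rem.length = p.length by omega, List.drop_left]

-- ===== VERDICT (by name: the statement is the Claim_ definition above) =====
theorem extract_multiple_names_from_text_spec : Claim_equal_extract_multiple_names_from_text := by
  intro names d _
  simp only [Spec_extract_multiple_names_from_text, extract_multiple_names_from_text,
    extract_multiple_names_from_text_alt]
  set cs := d.toList with hcs
  set N := names.length with hN
  have hmain := aLoop_eq_sLoop cs N 0 [] (by omega)
  rw [List.drop_zero] at hmain
  have hsplit := sLoop_eq_split N cs []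
  rw [splitOnMax_eq_split1 cs N]
  set parts := split1 N [] cs with hparts
  have htake : PySem.List.slice parts none (some (N : Int)) = parts.take N := by
    rw [PySem.List.slice_to parts (by omega)]
    norm_num
  cases hs : sLoop cs [] N with
  | none =>
    rw [hs] at hmain hsplit
    simp only [Option.map_none] at hmain
    rw [hmain]
    by_cases hlen : parts.length = N + 1
    · rw [if_neg (by omega)]
      rw [if_pos hlen] at hsplit
      cases hb : bChunks (parts.take N) [] with
      | none => rw [htake, hb]
      | some res => rw [hb] at hsplit; simp at hsplit
    · rw [if_pos (by omega)]
  | some p =>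
    obtain ⟨res, rem⟩ := p
    rw [hs] at hmain hsplit
    simp only [Option.map_some] at hmain
    rw [hmain]
    by_cases hlen : parts.length = N + 1
    · rw [if_pos hlen] at hsplit
      rw [if_neg (by omega), htake]
      cases hb : bChunks (parts.take N) [] with
      | none => rw [hb] at hsplit; simp at hsplit
      | some res2 =>
        rw [hb] at hsplit
        simp only [Option.map_some, Option.some.injEq, Prod.mk.injEq] at hsplit
        obtain ⟨hres, hrem⟩ := hsplit
        have haL : aLoop cs N 0 0 [] = some (res, cs.length - rem.length) := hmain
        have hreslen : res.length = N := by
          simpa using aLoop_length cs N 0 0 [] res (cs.length - rem.length) haL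
        simp only []
        rw [if_pos hreslen]
        have hsuf : rem <:+ cs := sLoop_suffix N cs [] res rem hs
        have hdrop : PySem.List.slice cs (some ((cs.length - rem.length : Nat) : Int)) none = rem := by
          rw [PySem.List.slice_from_natCast]
          exact suffix_drop_eq rem cs hsuf
        rw [hdrop]
        have hget : (PySem.List.pyGet? parts (N : Int)).getD [] = parts.getLastD [] := by
          rw [PySem.List.pyGet?_natCast]
          rw [List.getElem?_eq_getElem (by omega)]
          rw [List.getLastD_eq_getLast?, List.getLast?_eq_getElem?]
          rw [List.getElem?_eq_getElem (by omega)]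
          simp [hlen]
        rw [hget, hres, ← hrem]
    · rw [if_neg hlen] at hsplit
      simp at hsplit
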